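-- pv_equiv track=rewrite | github.com/ana-raka/dailyBOJ | 프로그래머스/3/87694. 아이템 줍기/아이템 줍기.py | solution
-- ===== SOURCE A (Python) =====
-- from collections import deque
--
-- def solution(rectangle, characterX, characterY, itemX, itemY):
--     graph = [[0 for _ in range(102)] for _ in range(102)]
--     for lx, ly, rx, ry in rectangle:
--         lx, ly, rx, ry = lx * 2, ly * 2, rx * 2, ry * 2
--         for y in range(ly, ry + 1):
--             for x in range(lx, rx + 1):
--                 if x == lx or x == rx or y == ly or y == ry:
--                     if graph[y][x] == 0:
--                         graph[y][x] = 1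
--                 else:
--                     graph[y][x] = -1
--     def BFS():
--         graph[characterY * 2][characterX * 2] = 1
--         que = deque([(characterY * 2, characterX * 2)])
--         mv = [(0,1),(0,-1),(1,0),(-1,0)]
--         while que:
--             y,x = que.popleft()
--             if (y, x) == (itemY * 2, itemX * 2):
--                 return graph[y][x] // 2
--             for my, mx in mv:
--                 mvy = my + y
--                 mvx = mx + x
--                 if 1 <= mvy < 102 and 1 <= mvx < 102:
--                     if graph[mvy][mvx] == 1:
--                         graph[mvy][mvx] = graph[y][x] + 1
--                         que.append((mvy, mvx))
--     return BFS()
-- ===== SOURCE B (Python) =====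
-- from collections import deque
--
-- def solution(rectangle, characterX, characterY, itemX, itemY):
--     # A cell of the doubled grid is walkable iff it lies on some rectangle's
--     # perimeter and strictly inside no rectangle; computed pointwise instead
--     # of painting rectangles one by one.
--     def cell(y, x):
--         if any(2 * lx < x < 2 * rx and 2 * ly < y < 2 * ry
--                for lx, ly, rx, ry in rectangle):
--             return -1
--         if any(2 * lx <= x <= 2 * rx and 2 * ly <= y <= 2 * ry and
--                (x == 2 * lx or x == 2 * rx or y == 2 * ly or y == 2 * ry)
--                for lx, ly, rx, ry in rectangle):
--             return 1
--         return 0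
--     graph = [[cell(y, x) for x in range(102)] for y in range(102)]
--     graph[characterY * 2][characterX * 2] = 1
--     que = deque([(characterY * 2, characterX * 2)])
--     mv = [(0, 1), (0, -1), (1, 0), (-1, 0)]
--     while que:
--         y, x = que.popleft()
--         if (y, x) == (itemY * 2, itemX * 2):
--             return graph[y][x] // 2
--         for my, mx in mv:
--             mvy = my + y
--             mvx = mx + x
--             if 1 <= mvy < 102 and 1 <= mvx < 102:
--                 if graph[mvy][mvx] == 1:
--                     graph[mvy][mvx] = graph[y][x] + 1
--                     que.append((mvy, mvx))
--     return None
-- ===== Notes on version B (the rewrite author's own statement) =====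
-- stated objective: simpler
-- what changed: The doubled 102x102 grid is built by a pointwise walkability rule (a cell is -1 iff strictly inside some rectangle, else 1 iff on some rectangle's perimeter) instead of A's per-rectangle painting loops with conditional overwrites; the BFS over the grid is unchanged.
-- outside the precondition, e.g. on solution([[-1, 1, 1, 3]], 1, 1, 1, 1): A returns 0, B returns 0; on solution([[-1, 1, 1, 3]], 0, 1, 1, 2): A returns 2, B returns 2
import Mathlib
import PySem

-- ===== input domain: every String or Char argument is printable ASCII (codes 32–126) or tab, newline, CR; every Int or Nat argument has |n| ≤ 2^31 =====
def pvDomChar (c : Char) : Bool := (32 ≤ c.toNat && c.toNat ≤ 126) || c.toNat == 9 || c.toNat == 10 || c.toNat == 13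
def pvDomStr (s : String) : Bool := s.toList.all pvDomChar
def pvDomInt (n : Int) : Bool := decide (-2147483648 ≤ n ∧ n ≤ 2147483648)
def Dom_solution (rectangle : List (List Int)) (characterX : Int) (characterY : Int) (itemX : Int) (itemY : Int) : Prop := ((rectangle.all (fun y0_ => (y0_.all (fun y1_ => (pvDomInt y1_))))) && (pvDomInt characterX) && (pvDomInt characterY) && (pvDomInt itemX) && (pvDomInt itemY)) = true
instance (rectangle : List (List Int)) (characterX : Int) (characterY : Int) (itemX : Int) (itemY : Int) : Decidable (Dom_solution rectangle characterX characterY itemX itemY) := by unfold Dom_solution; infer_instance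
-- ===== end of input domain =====

-- ===== PORT A =====
-- B builds the same doubled grid by a pointwise walkability rule instead of A's
-- per-rectangle painting loops; the BFS is unchanged (objective: simpler).
-- The Python list-of-lists grid is ported as Array (Array Int); indexing models
-- Python's semantics exactly for indices in [-102, 101] (negative indices wrap
-- by +102) — Pre_ keeps every index the Python programs touch inside that window.

def pyIdx (i : Int) : Nat := (if 0 ≤ i then i else i + 102).toNat

def aget (g : Array (Array Int)) (y x : Int) : Int :=
  (g.getD (pyIdx y) #[]).getD (pyIdx x) 0

def aset (g : Array (Array Int)) (y x v : Int) : Array (Array Int) :=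
  g.setIfInBounds (pyIdx y) ((g.getD (pyIdx y) #[]).setIfInBounds (pyIdx x) v)

-- one assignment of A's innermost loop body, for cell (y, x)
def paintStep (lx rx ly ry y : Int) (g : Array (Array Int)) (x : Int) : Array (Array Int) :=
  if x = lx ∨ x = rx ∨ y = ly ∨ y = ry then
    (if aget g y x = 0 then aset g y x 1 else g)
  else aset g y x (-1)

-- A's inner `for x in range(lx, rx + 1)` loop
def paintRow (lx rx ly ry : Int) (g : Array (Array Int)) (y : Int) : Array (Array Int) :=
  (PySem.List.pyRange lx (rx + 1) 1).foldl (paintStep lx rx ly ry y) g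

-- A's body of `for lx, ly, rx, ry in rectangle` (rows of length ≠ 4 raise
-- ValueError in Python; Pre_ excludes them, the fallback leaves g unchanged)
def paintRect (g : Array (Array Int)) (row : List Int) : Array (Array Int) :=
  match row with
  | [lx, ly, rx, ry] =>
    (PySem.List.pyRange (ly * 2) (ry * 2 + 1) 1).foldl (paintRow (lx * 2) (rx * 2) (ly * 2) (ry * 2)) g
  | _ => g

-- The while-loop of BFS(), textually identical in A and in B; ported once and
-- used by both ports.  Fuel: each enqueue turns a cell's value from 1 into a
-- value ≥ 2 (plus the initial cell), so 20000 > 102*102+1 iterations suffice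
-- on every input Pre_ admits; `none` on exhaustion is never reached there.
def bfsRun (ty tx : Int) : Nat → Array (Array Int) → List (Int × Int) → Option Int
  | 0, _, _ => none
  | _ + 1, _, [] => none
  | fuel + 1, g, (y, x) :: que =>
    if y = ty ∧ x = tx then some (PySem.Int.floordiv (aget g y x) 2)
    else
      let s := [((0 : Int), (1 : Int)), (0, -1), (1, 0), (-1, 0)].foldl
        (fun (s : Array (Array Int) × List (Int × Int)) m =>
          let mvy := m.1 + y
          let mvx := m.2 + x
          if 1 ≤ mvy ∧ mvy < 102 ∧ 1 ≤ mvx ∧ mvx < 102 then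
            if aget s.1 mvy mvx = 1 then
              (aset s.1 mvy mvx (aget s.1 y x + 1), s.2 ++ [(mvy, mvx)])
            else s
          else s) (g, que)
      bfsRun ty tx fuel s.1 s.2

def solution (rectangle : List (List Int)) (characterX : Int) (characterY : Int) (itemX : Int) (itemY : Int) : Option Int :=
  let graph := rectangle.foldl paintRect (Array.replicate 102 (Array.replicate 102 0))
  let graph := aset graph (characterY * 2) (characterX * 2) 1
  bfsRun (itemY * 2) (itemX * 2) 20000 graph [(characterY * 2, characterX * 2)]

-- ===== PORT B =====
-- strictly inside the doubled rectangle given by `row`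
def insideB (y x : Int) (row : List Int) : Bool :=
  match row with
  | [lx, ly, rx, ry] => decide (2 * lx < x ∧ x < 2 * rx ∧ 2 * ly < y ∧ y < 2 * ry)
  | _ => false

-- on the perimeter of the doubled rectangle given by `row`
def boundB (y x : Int) (row : List Int) : Bool :=
  match row with
  | [lx, ly, rx, ry] => decide ((2 * lx ≤ x ∧ x ≤ 2 * rx ∧ 2 * ly ≤ y ∧ y ≤ 2 * ry) ∧
      (x = 2 * lx ∨ x = 2 * rx ∨ y = 2 * ly ∨ y = 2 * ry))
  | _ => false

def cellB (rectangle : List (List Int)) (y x : Int) : Int :=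
  if rectangle.any (insideB y x) then -1
  else if rectangle.any (boundB y x) then 1
  else 0

def solution_alt (rectangle : List (List Int)) (characterX : Int) (characterY : Int) (itemX : Int) (itemY : Int) : Option Int :=
  let graph := (Array.range 102).map (fun (y : Nat) => (Array.range 102).map (fun (x : Nat) => cellB rectangle (y : Int) (x : Int)))
  let graph := aset graph (characterY * 2) (characterX * 2) 1
  bfsRun (itemY * 2) (itemX * 2) 20000 graph [(characterY * 2, characterX * 2)]

-- ===== PRECONDITION & SPEC =====
-- the coordinates a rectangle row makes A's loops index with stay in the grid
def rowOK (row : List Int) : Bool :=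
  match row with
  | [lx, ly, rx, ry] => decide (lx ≤ rx ∧ ly ≤ ry → 0 ≤ lx ∧ rx ≤ 50 ∧ 0 ≤ ly ∧ ry ≤ 50)
  | _ => false

-- Pre_ restricts to the task's natural domain (rectangle rows of 4 coordinates
-- in [0, 50] whenever their ranges are non-empty, character inside the grid);
-- outside it the Python A raises IndexError/ValueError, or silently paints
-- through Python's negative-index wraparound (original problem domain: 1..50).
def Pre_solution (rectangle : List (List Int)) (characterX : Int) (characterY : Int) (itemX : Int) (itemY : Int) : Prop :=
  (∀ row ∈ rectangle, rowOK row = true) ∧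
  (-51 ≤ characterX ∧ characterX ≤ 50) ∧ (-51 ≤ characterY ∧ characterY ≤ 50)
instance (rectangle : List (List Int)) (characterX : Int) (characterY : Int) (itemX : Int) (itemY : Int) : Decidable (Pre_solution rectangle characterX characterY itemX itemY) := by unfold Pre_solution; infer_instance

def pvWitness_solution : List (List Int) × Int × Int × Int × Int := ([[1, 1, 3, 3]], 1, 1, 3, 3)

def Spec_solution (rectangle : List (List Int)) (characterX : Int) (characterY : Int) (itemX : Int) (itemY : Int) (out : Option Int) : Prop := out = solution_alt rectangle characterX characterY itemX itemY
instance (rectangle : List (List Int)) (characterX : Int) (characterY : Int) (itemX : Int) (itemY : Int) (out : Option Int) : Decidable (Spec_solution rectangle characterX characterY itemX itemY out) := by unfold Spec_solution; infer_instance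

-- ===== CLAIM (what is proved, stated in full; the proofs are below) =====
def Claim_equal_solution : Prop := ∀ (rectangle : List (List Int)) (characterX : Int) (characterY : Int) (itemX : Int) (itemY : Int), Dom_solution rectangle characterX characterY itemX itemY → Pre_solution rectangle characterX characterY itemX itemY → Spec_solution rectangle characterX characterY itemX itemY (solution rectangle characterX characterY itemX itemY)

-- ===== LEMMAS AND PROOFS =====

-- the 102×102 shape invariant of the grid
def WfG (g : Array (Array Int)) : Prop :=
  g.size = 102 ∧ ∀ (i : Nat) (h : i < g.size), (g[i]).size = 102

theorem getD_setIfInBounds_ne {α : Type} (xs : Array α) (i j : Nat) (a d : α) (h : i ≠ j) :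
    (xs.setIfInBounds i a).getD j d = xs.getD j d := by
  rw [Array.getD_eq_getD_getElem?, Array.getD_eq_getD_getElem?,
      Array.getElem?_setIfInBounds, if_neg h]

theorem getD_setIfInBounds_eq {α : Type} (xs : Array α) (i : Nat) (a d : α) (h : i < xs.size) :
    (xs.setIfInBounds i a).getD i d = a := by
  rw [Array.getD_eq_getD_getElem?, Array.getElem?_setIfInBounds, if_pos rfl, if_pos h]
  rfl

theorem getD_setIfInBounds_oob {α : Type} (xs : Array α) (i : Nat) (a : α) (h : ¬ i < xs.size) :
    xs.setIfInBounds i a = xs := by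
  apply Array.ext
  · simp [Array.size_setIfInBounds]
  · intro k hk hk'
    rw [Array.getElem_setIfInBounds hk']
    rw [if_neg (by omega)]

theorem wf_aset (g : Array (Array Int)) (y x v : Int) (hw : WfG g) : WfG (aset g y x v) := by
  obtain ⟨h1, h2⟩ := hw
  constructor
  · simp [aset, Array.size_setIfInBounds, h1]
  · intro i hi
    have hi' : i < g.size := by simpa [aset, Array.size_setIfInBounds] using hi
    simp only [aset]
    rw [Array.getElem_setIfInBounds hi']
    split
    · next hEq =>
      rw [Array.size_setIfInBounds, Array.getD_eq_getD_getElem?,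
          Array.getElem?_eq_getElem (hEq ▸ hi')]
      simpa using h2 _ (hEq ▸ hi')
    · exact h2 i hi'

theorem aget_aset_ne (g : Array (Array Int)) (y x v y0 x0 : Int)
    (h : pyIdx y0 ≠ pyIdx y ∨ pyIdx x0 ≠ pyIdx x) :
    aget (aset g y x v) y0 x0 = aget g y0 x0 := by
  by_cases hy : pyIdx y0 = pyIdx y
  · rcases h with h | h
    · exact absurd hy h
    · simp only [aget, aset]
      rw [hy]
      by_cases hlt : pyIdx y < g.size
      · rw [getD_setIfInBounds_eq _ _ _ _ hlt]
        rw [getD_setIfInBounds_ne _ _ _ _ _ (fun e => h e.symm)]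
      · rw [getD_setIfInBounds_oob _ _ _ hlt]
  · simp only [aget, aset]
    rw [getD_setIfInBounds_ne _ _ _ _ _ (fun e => hy e.symm)]

theorem aget_aset_eq (g : Array (Array Int)) (y x v : Int) (hw : WfG g)
    (hy1 : 0 ≤ y) (hy2 : y < 102) (hx1 : 0 ≤ x) (hx2 : x < 102) :
    aget (aset g y x v) y x = v := by
  obtain ⟨h1, h2⟩ := hw
  have hylt : pyIdx y < g.size := by simp only [pyIdx, if_pos hy1]; omega
  have hrow : (g.getD (pyIdx y) #[]).size = 102 := by
    rw [Array.getD_eq_getD_getElem?, Array.getElem?_eq_getElem hylt]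
    simpa using h2 _ hylt
  have hxlt : pyIdx x < (g.getD (pyIdx y) #[]).size := by
    rw [hrow]; simp only [pyIdx, if_pos hx1]; omega
  simp only [aget, aset]
  rw [getD_setIfInBounds_eq _ _ _ _ hylt, getD_setIfInBounds_eq _ _ _ _ hxlt]

theorem pyIdx_inj (i j : Int) (hi1 : 0 ≤ i) (hi2 : i < 102) (hj1 : 0 ≤ j) (hj2 : j < 102) :
    pyIdx i = pyIdx j ↔ i = j := by
  simp only [pyIdx, if_pos hi1, if_pos hj1]
  omega

-- a foldl preserves a predicate its step preserves
theorem foldl_preserve {α β : Type} (P : α → Prop) (f : α → β → α)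
    (h : ∀ g a, P g → P (f g a)) : ∀ (l : List β) (g : α), P g → P (l.foldl f g) := by
  intro l
  induction l with
  | nil => intro g hg; exact hg
  | cons a l ih => intro g hg; exact ih _ (h g a hg)

theorem wf_paintStep (lx rx ly ry y : Int) (g : Array (Array Int)) (x : Int) (hw : WfG g) :
    WfG (paintStep lx rx ly ry y g x) := by
  unfold paintStep
  split_ifs <;> first | exact wf_aset _ _ _ _ hw | exact hw

theorem wf_paintRow (lx rx ly ry : Int) (g : Array (Array Int)) (y : Int) (hw : WfG g) :
    WfG (paintRow lx rx ly ry g y) :=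
  foldl_preserve WfG _ (fun g a hg => wf_paintStep lx rx ly ry y g a hg) _ g hw

theorem wf_paintRect (g : Array (Array Int)) (row : List Int) (hw : WfG g) :
    WfG (paintRect g row) := by
  unfold paintRect
  rcases row with _ | ⟨lx, _ | ⟨ly, _ | ⟨rx, _ | ⟨ry, _ | ⟨z, tl⟩⟩⟩⟩⟩ <;>
    first
    | exact hw
    | exact foldl_preserve WfG _ (fun g a hg => wf_paintRow _ _ _ _ g a hg) _ g hw

-- pointwise effect of one innermost assignment (all coordinates in the grid)
theorem paintStep_eval (lx rx ly ry y : Int) (g : Array (Array Int)) (xv y0 x0 : Int)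
    (hw : WfG g) (hy : 0 ≤ y ∧ y < 102) (hxv : 0 ≤ xv ∧ xv < 102)
    (hy0 : 0 ≤ y0 ∧ y0 < 102) (hx0 : 0 ≤ x0 ∧ x0 < 102) :
    aget (paintStep lx rx ly ry y g xv) y0 x0 =
      if y0 = y ∧ x0 = xv then
        (if xv = lx ∨ xv = rx ∨ y = ly ∨ y = ry then (if aget g y xv = 0 then 1 else aget g y xv) else -1)
      else aget g y0 x0 := by
  by_cases hc : y0 = y ∧ x0 = xv
  · obtain ⟨e1, e2⟩ := hc
    subst e1; subst e2
    unfold paintStep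
    split_ifs <;>
      simp_all [aget_aset_eq _ _ _ _ hw hy0.1 hy0.2 hx0.1 hx0.2]
  · have hne : pyIdx y0 ≠ pyIdx y ∨ pyIdx x0 ≠ pyIdx xv := by
      by_cases e1 : y0 = y
      · subst e1
        right
        rw [Ne, pyIdx_inj x0 xv hx0.1 hx0.2 hxv.1 hxv.2]
        intro e2; exact hc ⟨rfl, e2⟩
      · left
        rw [Ne, pyIdx_inj y0 y hy0.1 hy0.2 hy.1 hy.2]
        exact e1
    unfold paintStep
    rw [if_neg hc]
    split_ifs <;> first | rw [aget_aset_ne _ _ _ _ _ _ hne] | rfl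

-- pointwise effect of A's inner x-loop on row y
set_option maxHeartbeats 2000000 in
theorem foldl_paintStep (lx rx ly ry y b : Int) (hb : b ≤ 102) (hy : 0 ≤ y ∧ y < 102) :
    ∀ (n : Nat) (a : Int), (b - a).toNat = n → 0 ≤ a →
    ∀ (g : Array (Array Int)), WfG g → ∀ (y0 x0 : Int), 0 ≤ y0 ∧ y0 < 102 → 0 ≤ x0 ∧ x0 < 102 →
    aget ((PySem.List.pyRange a b 1).foldl (paintStep lx rx ly ry y) g) y0 x0 =
      if y0 = y ∧ a ≤ x0 ∧ x0 < b then
        (if x0 = lx ∨ x0 = rx ∨ y = ly ∨ y = ry then (if aget g y x0 = 0 then 1 else aget g y x0) else -1)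
      else aget g y0 x0 := by
  intro n
  induction n with
  | zero =>
    intro a ha ha0 g hw y0 x0 hy0 hx0
    rw [PySem.List.pyRange_one_eq_nil (by omega)]
    simp only [List.foldl_nil]
    rw [if_neg (by omega)]
  | succ n ih =>
    intro a ha ha0 g hw y0 x0 hy0 hx0
    rw [PySem.List.pyRange_one_cons (by omega)]
    simp only [List.foldl_cons]
    rw [ih (a + 1) (by omega) (by omega) _ (wf_paintStep _ _ _ _ _ _ _ hw) y0 x0 hy0 hx0]
    rw [paintStep_eval lx rx ly ry y g a y0 x0 hw hy (by omega) hy0 hx0]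
    rw [paintStep_eval lx rx ly ry y g a y x0 hw hy (by omega) hy hx0]
    clear ih hw
    split_ifs <;> simp_all <;> omega

-- pointwise effect of A's inner loop as a single row update
theorem paintRow_eval (lx rx ly ry : Int) (g : Array (Array Int)) (y y0 x0 : Int)
    (hw : WfG g) (hlx : 0 ≤ lx) (hrx : rx < 102) (hy : 0 ≤ y ∧ y < 102)
    (hy0 : 0 ≤ y0 ∧ y0 < 102) (hx0 : 0 ≤ x0 ∧ x0 < 102) :
    aget (paintRow lx rx ly ry g y) y0 x0 =
      if y0 = y ∧ lx ≤ x0 ∧ x0 < rx + 1 then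
        (if x0 = lx ∨ x0 = rx ∨ y = ly ∨ y = ry then (if aget g y x0 = 0 then 1 else aget g y x0) else -1)
      else aget g y0 x0 := by
  unfold paintRow
  exact foldl_paintStep lx rx ly ry y (rx + 1) (by omega) hy (rx + 1 - lx).toNat lx rfl hlx g hw y0 x0 hy0 hx0

-- an empty x-range paints nothing
theorem paintRow_empty (lx rx ly ry : Int) (g : Array (Array Int)) (y : Int)
    (h : rx + 1 ≤ lx) : paintRow lx rx ly ry g y = g := by
  unfold paintRow
  rw [PySem.List.pyRange_one_eq_nil h]
  rfl

theorem foldl_paintRow_empty (lx rx ly ry : Int) (h : rx + 1 ≤ lx) :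
    ∀ (l : List Int) (g : Array (Array Int)), l.foldl (paintRow lx rx ly ry) g = g := by
  intro l
  induction l with
  | nil => intro g; rfl
  | cons a l ih => intro g; simp [List.foldl_cons, paintRow_empty lx rx ly ry g a h, ih]

-- pointwise effect of A's outer y-loop
set_option maxHeartbeats 2000000 in
theorem foldl_paintRow (lx rx ly ry b : Int) (hb : b ≤ 102) (hlx : 0 ≤ lx) (hrx : rx < 102) :
    ∀ (n : Nat) (a : Int), (b - a).toNat = n → 0 ≤ a →
    ∀ (g : Array (Array Int)), WfG g → ∀ (y0 x0 : Int), 0 ≤ y0 ∧ y0 < 102 → 0 ≤ x0 ∧ x0 < 102 →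
    aget ((PySem.List.pyRange a b 1).foldl (paintRow lx rx ly ry) g) y0 x0 =
      if a ≤ y0 ∧ y0 < b ∧ lx ≤ x0 ∧ x0 < rx + 1 then
        (if x0 = lx ∨ x0 = rx ∨ y0 = ly ∨ y0 = ry then (if aget g y0 x0 = 0 then 1 else aget g y0 x0) else -1)
      else aget g y0 x0 := by
  intro n
  induction n with
  | zero =>
    intro a ha ha0 g hw y0 x0 hy0 hx0
    rw [PySem.List.pyRange_one_eq_nil (by omega)]
    simp only [List.foldl_nil]
    rw [if_neg (by omega)]
  | succ n ih =>
    intro a ha ha0 g hw y0 x0 hy0 hx0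
    rw [PySem.List.pyRange_one_cons (by omega)]
    simp only [List.foldl_cons]
    rw [ih (a + 1) (by omega) (by omega) _ (wf_paintRow _ _ _ _ _ _ hw) y0 x0 hy0 hx0]
    rw [paintRow_eval lx rx ly ry g a y0 x0 hw hlx hrx (by omega) hy0 hx0]
    clear ih hw
    split_ifs <;> simp_all <;> omega

-- the painted grid, pointwise: -1 iff strictly inside some rectangle, else 1
-- iff on some perimeter (conditional on the starting grid)
set_option maxHeartbeats 2000000 in
theorem foldl_paintRect (y0 x0 : Int) (hy0 : 0 ≤ y0 ∧ y0 < 102) (hx0 : 0 ≤ x0 ∧ x0 < 102) :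
    ∀ (rects : List (List Int)), (∀ row ∈ rects, rowOK row = true) →
    ∀ (g : Array (Array Int)), WfG g →
    aget (rects.foldl paintRect g) y0 x0 =
      if rects.any (insideB y0 x0) then -1
      else if rects.any (boundB y0 x0) then (if aget g y0 x0 = 0 then 1 else aget g y0 x0)
      else aget g y0 x0 := by
  intro rects
  induction rects with
  | nil => intro _ g _; simp
  | cons r rects ih =>
    intro hok g hw
    simp only [List.foldl_cons, List.any_cons]
    rw [ih (fun row hm => hok row (List.mem_cons_of_mem r hm)) _ (wf_paintRect g r hw)]
    have hr := hok r (List.mem_cons_self ..)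
    rcases r with _ | ⟨lx, _ | ⟨ly, _ | ⟨rx, _ | ⟨ry, _ | ⟨z, tl⟩⟩⟩⟩⟩ <;>
      simp only [rowOK, decide_eq_true_eq, Bool.false_eq_true] at hr <;>
      simp only [paintRect, insideB, boundB, Bool.false_or, decide_eq_true_eq, Bool.or_eq_true]
    by_cases hyr : ly ≤ ry
    · by_cases hxr : lx ≤ rx
      · obtain ⟨h1, h2, h3, h4⟩ := hr ⟨hxr, hyr⟩
        rw [foldl_paintRow (lx * 2) (rx * 2) (ly * 2) (ry * 2) (ry * 2 + 1) (by omega)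
              (by omega) (by omega) (ry * 2 + 1 - ly * 2).toNat (ly * 2) rfl (by omega) g hw
              y0 x0 hy0 hx0]
        by_cases hin : rects.any (insideB y0 x0) = true <;>
          by_cases hbd : rects.any (boundB y0 x0) = true <;>
          simp [hin, hbd] <;> split_ifs <;> simp_all <;> omega
      · rw [foldl_paintRow_empty (lx * 2) (rx * 2) (ly * 2) (ry * 2) (by omega)]
        by_cases hin : rects.any (insideB y0 x0) = true <;>
          by_cases hbd : rects.any (boundB y0 x0) = true <;>
          simp [hin, hbd] <;> split_ifs <;> simp_all <;> omega
    · rw [PySem.List.pyRange_one_eq_nil (by omega)]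
      simp only [List.foldl_nil]
      by_cases hin : rects.any (insideB y0 x0) = true <;>
        by_cases hbd : rects.any (boundB y0 x0) = true <;>
        simp [hin, hbd] <;> split_ifs <;> simp_all <;> omega

-- B's comprehension-built grid is well-formed and reads back cellB
theorem wf_gridB (rectangle : List (List Int)) :
    WfG ((Array.range 102).map (fun (y : Nat) => (Array.range 102).map (fun (x : Nat) => cellB rectangle (y : Int) (x : Int)))) := by
  constructor
  · simp
  · intro i hi
    simp

theorem aget_gridB (rectangle : List (List Int)) (y0 x0 : Int)
    (hy0 : 0 ≤ y0 ∧ y0 < 102) (hx0 : 0 ≤ x0 ∧ x0 < 102) :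
    aget ((Array.range 102).map (fun (y : Nat) => (Array.range 102).map (fun (x : Nat) => cellB rectangle (y : Int) (x : Int)))) y0 x0
      = cellB rectangle y0 x0 := by
  have hy : pyIdx y0 = y0.toNat := by simp [pyIdx, hy0.1]
  have hx : pyIdx x0 = x0.toNat := by simp [pyIdx, hx0.1]
  have hylt : y0.toNat < 102 := by omega
  have hxlt : x0.toNat < 102 := by omega
  unfold aget
  rw [hy, hx]
  simp only [Array.getD_eq_getD_getElem?]
  rw [Array.getElem?_map, Array.getElem?_range, if_pos hylt]
  simp only [Option.map_some, Option.getD_some]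
  rw [Array.getElem?_map, Array.getElem?_range, if_pos hxlt]
  simp only [Option.map_some, Option.getD_some]
  congr 1 <;> omega

-- the initial all-zero grid
theorem wf_grid0 : WfG (Array.replicate 102 (Array.replicate 102 (0 : Int))) := by
  constructor
  · simp
  · intro i hi
    simp

theorem aget_grid0 (y0 x0 : Int) (hy0 : 0 ≤ y0 ∧ y0 < 102) (hx0 : 0 ≤ x0 ∧ x0 < 102) :
    aget (Array.replicate 102 (Array.replicate 102 (0 : Int))) y0 x0 = 0 := by
  have hy : pyIdx y0 < 102 := by simp only [pyIdx, if_pos hy0.1]; omega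
  have hx : pyIdx x0 < 102 := by simp only [pyIdx, if_pos hx0.1]; omega
  unfold aget
  simp only [Array.getD_eq_getD_getElem?]
  rw [Array.getElem?_replicate, if_pos hy]
  simp only [Option.getD_some]
  rw [Array.getElem?_replicate, if_pos hx]
  rfl

-- two well-formed grids agreeing pointwise are equal
theorem grid_ext (g g' : Array (Array Int)) (hw : WfG g) (hw' : WfG g')
    (h : ∀ (y0 x0 : Int), 0 ≤ y0 ∧ y0 < 102 → 0 ≤ x0 ∧ x0 < 102 → aget g y0 x0 = aget g' y0 x0) :
    g = g' := by
  obtain ⟨h1, h2⟩ := hw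
  obtain ⟨h1', h2'⟩ := hw'
  apply Array.ext
  · omega
  · intro i hi hi'
    apply Array.ext
    · rw [h2 i hi, h2' i hi']
    · intro j hj hj'
      have hj102 : j < 102 := by rw [h2 i hi] at hj; exact hj
      have hi102 : i < 102 := by omega
      have hh := h (i : Int) (j : Int) (by omega) (by omega)
      have hpi : pyIdx (i : Int) = i := by
        simp only [pyIdx, if_pos (Int.natCast_nonneg i)]; omega
      have hpj : pyIdx (j : Int) = j := by
        simp only [pyIdx, if_pos (Int.natCast_nonneg j)]; omega
      unfold aget at hh
      rw [hpi, hpj] at hh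
      simp only [Array.getD_eq_getD_getElem?] at hh
      rw [Array.getElem?_eq_getElem hi, Array.getElem?_eq_getElem hi'] at hh
      simp only [Option.getD_some] at hh
      rw [Array.getElem?_eq_getElem (by rw [h2 i hi]; exact hj102),
          Array.getElem?_eq_getElem (by rw [h2' i hi']; exact hj102)] at hh
      simp only [Option.getD_some] at hh
      exact hh

theorem solution_spec : Claim_equal_solution := by
  intro rectangle characterX characterY itemX itemY _ hpre
  unfold Spec_solution solution solution_alt
  have hg : rectangle.foldl paintRect (Array.replicate 102 (Array.replicate 102 0)) =
      (Array.range 102).map (fun (y : Nat) => (Array.range 102).map (fun (x : Nat) => cellB rectangle (y : Int) (x : Int))) := by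
    apply grid_ext
    · exact foldl_preserve WfG _ (fun g a hg => wf_paintRect g a hg) _ _ wf_grid0
    · exact wf_gridB rectangle
    · intro y0 x0 hy0 hx0
      rw [foldl_paintRect y0 x0 hy0 hx0 rectangle hpre.1 _ wf_grid0]
      rw [aget_gridB rectangle y0 x0 hy0 hx0]
      rw [aget_grid0 y0 x0 hy0 hx0]
      simp [cellB]
  rw [hg]
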